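-- pv_equiv track=rewrite | github.com/MrBrantCode/unitest_baseline | mut_generate/mist_train_cf/cf_21685/solution.py | longest_palindrome_odd_distinct
-- ===== SOURCE A (Python) =====
-- def longest_palindrome_odd_distinct(s):
--     n = len(s)
--     longest = 0
--
--     # Iterate through each character as the center of palindrome
--     for i in range(n):
--         # Expand the palindrome outward
--         left = i
--         right = i
--
--         # Count distinct characters
--         distinct = set()
--         distinct.add(s[i])
--
--         while left >= 0 and right < n and s[left] == s[right]:
--             # Check if the palindrome has odd number of distinct characters
--             if len(distinct) % 2 == 1:
--                 longest = max(longest, right - left + 1)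
--
--             # Expand the palindrome
--             left -= 1
--             right += 1
--
--             # Update distinct characters
--             if left >= 0:
--                 distinct.add(s[left])
--             if right < n:
--                 distinct.add(s[right])
--
--     return longest
-- ===== SOURCE B (Python) =====
-- def longest_palindrome_odd_distinct(s):
--     n = len(s)
--     longest = 0
--     for i in range(n):
--         # phase 1: maximal palindrome radius around center i
--         r = 0
--         while i - r - 1 >= 0 and i + r + 1 < n and s[i - r - 1] == s[i + r + 1]:
--             r += 1
--         # phase 2: walk outward over that extent, accumulating distinct chars
--         seen = set()
--         for k in range(r + 1):
--             seen.add(s[i - k])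
--             seen.add(s[i + k])
--             if len(seen) % 2 == 1:
--                 longest = max(longest, 2 * k + 1)
--     return longest
-- ===== Notes on version B (the rewrite author's own statement) =====
-- stated objective: alternative
-- what changed: Per center, A interleaves the palindrome test, the distinct-set maintenance and the parity/maximum update in one while loop; B splits each center into two phases: a plain palindrome-radius expansion, then a separate outward walk over that extent that accumulates distinct characters and updates the maximum.
import Mathlib
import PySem

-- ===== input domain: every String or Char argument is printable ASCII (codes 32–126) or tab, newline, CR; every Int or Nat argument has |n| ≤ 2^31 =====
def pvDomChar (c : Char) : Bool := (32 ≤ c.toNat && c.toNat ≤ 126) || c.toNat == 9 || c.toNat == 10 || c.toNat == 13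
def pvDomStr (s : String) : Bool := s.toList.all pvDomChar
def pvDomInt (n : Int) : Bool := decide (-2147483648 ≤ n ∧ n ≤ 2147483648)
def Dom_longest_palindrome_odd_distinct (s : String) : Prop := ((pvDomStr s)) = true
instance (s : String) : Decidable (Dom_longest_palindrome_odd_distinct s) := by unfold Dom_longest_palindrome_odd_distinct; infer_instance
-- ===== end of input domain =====

-- B replaces A's single interleaved while loop per center by two phases (palindrome-radius
-- expansion, then an outward distinct-accumulating walk); same complexity, return value only.

-- ===== PORT A =====
-- s[j] under guards that keep j in range (exact there: pyGet? is some)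
def pvCharAt (cs : List Char) (j : Int) : Char := (PySem.List.pyGet? cs j).getD ' '

-- the 'while left >= 0 and right < n and s[left] == s[right]' loop of A
def pvAInner (cs : List Char) (n left right : Int) (distinct : PySem.Set Char)
    (longest : Int) : Int :=
  if h : 0 ≤ left ∧ right < n ∧ pvCharAt cs left = pvCharAt cs right then
    let longest' := if PySem.Int.mod (PySem.Set.len distinct) 2 == 1 then
        max longest (right - left + 1) else longest
    let d1 := if 0 ≤ left - 1 then PySem.Set.add distinct (pvCharAt cs (left - 1)) else distinct
    let d2 := if right + 1 < n then PySem.Set.add d1 (pvCharAt cs (right + 1)) else d1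
    pvAInner cs n (left - 1) (right + 1) d2 longest'
  else longest
termination_by (n - right).toNat
decreasing_by omega

def longest_palindrome_odd_distinct (s : String) : Int :=
  let cs := s.toList
  let n : Int := cs.length
  (PySem.List.pyRange 0 n 1).foldl
    (fun longest i =>
      pvAInner cs n i i (PySem.Set.add PySem.Set.empty (pvCharAt cs i)) longest) 0

-- ===== PORT B =====
-- phase 1 of Source B: the palindrome-radius while loop
def pvMaxRadius (cs : List Char) (n i r : Int) : Int :=
  if h : 0 ≤ i - r - 1 ∧ i + r + 1 < n ∧ pvCharAt cs (i - r - 1) = pvCharAt cs (i + r + 1) then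
    pvMaxRadius cs n i (r + 1)
  else r
termination_by (i - r).toNat
decreasing_by omega

-- phase 2 of Source B: one step of the 'for k in range(r + 1)' walk
def pvStep (cs : List Char) (i : Int) (st : PySem.Set Char × Int) (k : Int) :
    PySem.Set Char × Int :=
  let seen := PySem.Set.add (PySem.Set.add st.1 (pvCharAt cs (i - k))) (pvCharAt cs (i + k))
  let longest := if PySem.Int.mod (PySem.Set.len seen) 2 == 1 then
      max st.2 (2 * k + 1) else st.2
  (seen, longest)

def longest_palindrome_odd_distinct_alt (s : String) : Int :=
  let cs := s.toList
  let n : Int := cs.length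
  (PySem.List.pyRange 0 n 1).foldl
    (fun longest i =>
      let r := pvMaxRadius cs n i 0
      ((PySem.List.pyRange 0 (r + 1) 1).foldl (pvStep cs i)
        (PySem.Set.empty, longest)).2)
    0

-- ===== PRECONDITION & SPEC =====
def Spec_longest_palindrome_odd_distinct (s : String) (out : Int) : Prop := out = longest_palindrome_odd_distinct_alt s
instance (s : String) (out : Int) : Decidable (Spec_longest_palindrome_odd_distinct s out) := by unfold Spec_longest_palindrome_odd_distinct; infer_instance

-- ===== CLAIM (what is proved, stated in full; the proofs are below) =====
def Claim_equal_longest_palindrome_odd_distinct : Prop := ∀ (s : String), Dom_longest_palindrome_odd_distinct s → Spec_longest_palindrome_odd_distinct s (longest_palindrome_odd_distinct s)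

-- ===== LEMMAS AND PROOFS =====

-- the palindrome condition at radius q around center i
def pvCond (cs : List Char) (n i q : Int) : Prop :=
  0 ≤ i - q ∧ i + q < n ∧ pvCharAt cs (i - q) = pvCharAt cs (i + q)

lemma pvMaxRadius_ge (cs : List Char) (n i : Int) : ∀ r, r ≤ pvMaxRadius cs n i r := by
  intro r
  fun_induction pvMaxRadius cs n i r with
  | case1 r h ih => omega
  | case2 r h => omega

lemma pvMaxRadius_cond (cs : List Char) (n i : Int) :
    ∀ r q, r < q → q ≤ pvMaxRadius cs n i r → pvCond cs n i q := by
  intro r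
  fun_induction pvMaxRadius cs n i r with
  | case1 r h ih =>
    intro q hq1 hq2
    by_cases hqe : q = r + 1
    · subst hqe
      refine ⟨by omega, by omega, ?_⟩
      have e1 : i - (r + 1) = i - r - 1 := by ring
      have e2 : i + (r + 1) = i + r + 1 := by ring
      rw [e1, e2]; exact h.2.2
    · exact ih q (by omega) hq2
  | case2 r h => intro q hq1 hq2; omega

lemma pvMaxRadius_max (cs : List Char) (n i : Int) :
    ∀ r, ¬ pvCond cs n i (pvMaxRadius cs n i r + 1) := by
  intro r
  fun_induction pvMaxRadius cs n i r with
  | case1 r h ih => exact ih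
  | case2 r h =>
    intro hc
    apply h
    have e1 : i - r - 1 = i - (r + 1) := by ring
    have e2 : i + r + 1 = i + (r + 1) := by ring
    rw [e1, e2]
    exact hc

-- one-step unfolding of A's while loop with the lets inlined
lemma pvAInner_eq (cs : List Char) (n left right : Int) (distinct : PySem.Set Char)
    (longest : Int) :
    pvAInner cs n left right distinct longest =
    if 0 ≤ left ∧ right < n ∧ pvCharAt cs left = pvCharAt cs right then
      pvAInner cs n (left - 1) (right + 1)
        (if right + 1 < n then
           PySem.Set.add
             (if 0 ≤ left - 1 then PySem.Set.add distinct (pvCharAt cs (left - 1)) else distinct)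
             (pvCharAt cs (right + 1))
         else
           (if 0 ≤ left - 1 then PySem.Set.add distinct (pvCharAt cs (left - 1)) else distinct))
        (if PySem.Int.mod (PySem.Set.len distinct) 2 == 1 then
           max longest (right - left + 1) else longest)
    else longest := by
  rw [pvAInner]
  split_ifs <;> rfl

-- per-center bridge: A's interleaved loop from radius r equals B's phase-2 walk over [r, R]
lemma pvBridge (cs : List Char) (n i R : Int)
    (hcond : ∀ q, 0 ≤ q → q ≤ R → pvCond cs n i q)
    (hmax : ¬ pvCond cs n i (R + 1)) :
    ∀ (m : Nat) (r : Int), 0 ≤ r → r ≤ R → (R - r).toNat = m →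
    ∀ (D : PySem.Set Char) (longest : Int),
    pvAInner cs n (i - r) (i + r)
      (PySem.Set.add (PySem.Set.add D (pvCharAt cs (i - r))) (pvCharAt cs (i + r))) longest
    = ((PySem.List.pyRange r (R + 1) 1).foldl (pvStep cs i) (D, longest)).2 := by
  intro m
  induction m with
  | zero =>
    intro r hr0 hrR hm D longest
    have hrR' : r = R := by omega
    subst hrR'
    obtain ⟨h1, h2, h3⟩ := hcond r hr0 le_rfl
    rw [pvAInner_eq, if_pos ⟨h1, h2, h3⟩]
    rw [pvAInner_eq, if_neg (by
      intro hc
      exact hmax ⟨by omega, by omega, by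
        have e1 : i - (r + 1) = i - r - 1 := by ring
        have e2 : i + (r + 1) = i + r + 1 := by ring
        rw [e1, e2]; exact hc.2.2⟩)]
    rw [PySem.List.pyRange_one_singleton, List.foldl_cons, List.foldl_nil, pvStep]
    have e3 : i + r - (i - r) + 1 = 2 * r + 1 := by ring
    simp only [e3]
  | succ m ih =>
    intro r hr0 hrR hm D longest
    have hrR' : r < R := by omega
    obtain ⟨h1, h2, h3⟩ := hcond r hr0 (by omega)
    obtain ⟨g1, g2, g3⟩ := hcond (r + 1) (by omega) (by omega)
    rw [pvAInner_eq, if_pos ⟨h1, h2, h3⟩]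
    rw [if_pos (by omega : i + r + 1 < n), if_pos (by omega : (0:Int) ≤ i - r - 1)]
    have e1 : i - r - 1 = i - (r + 1) := by ring
    have e2 : i + r + 1 = i + (r + 1) := by ring
    have e3 : i + r - (i - r) + 1 = 2 * r + 1 := by ring
    rw [e1, e2, e3]
    rw [ih (r + 1) (by omega) (by omega) (by omega)]
    rw [PySem.List.pyRange_one_cons (by omega : r < R + 1), List.foldl_cons, pvStep]

-- ===== VERDICT (by name: the statement is the Claim_ definition above) =====
theorem longest_palindrome_odd_distinct_spec : Claim_equal_longest_palindrome_odd_distinct := by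
  intro s _
  unfold Spec_longest_palindrome_odd_distinct
  unfold longest_palindrome_odd_distinct longest_palindrome_odd_distinct_alt
  apply PySem.List.foldl_congr_mem
  intro longest i hi
  rw [PySem.List.mem_pyRange_one] at hi
  set cs := s.toList with hcs
  set n : Int := (cs.length : Int) with hn
  set R : Int := pvMaxRadius cs n i 0 with hR
  have hR0 : (0:Int) ≤ R := le_trans le_rfl (pvMaxRadius_ge cs n i 0)
  have hcond : ∀ q, 0 ≤ q → q ≤ R → pvCond cs n i q := by
    intro q hq0 hqR
    by_cases hq : q = 0
    · subst hq
      exact ⟨by omega, by omega, by norm_num⟩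
    · exact pvMaxRadius_cond cs n i 0 q (by omega) hqR
  have hmax : ¬ pvCond cs n i (R + 1) := pvMaxRadius_max cs n i 0
  have hb := pvBridge cs n i R hcond hmax (R - 0).toNat 0 le_rfl hR0 rfl
      PySem.Set.empty longest
  have e0m : i - 0 = i := by ring
  have e0p : i + 0 = i := by ring
  rw [e0m, e0p] at hb
  have hadd : PySem.Set.add (PySem.Set.add PySem.Set.empty (pvCharAt cs i)) (pvCharAt cs i)
      = PySem.Set.add PySem.Set.empty (pvCharAt cs i) := by
    apply PySem.Set.add_of_mem
    simp
  rw [hadd] at hb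
  exact hb
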